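-- pv_equiv track=rewrite | github.com/Bryce-59/http-proxy | proxy.py | fetchHost
-- ===== SOURCE A (Python) =====
-- def fetchHost(line_set):
--     # HOST: <address>:<port>
--     # HOST: <address>
--     hostAddress = None
--     for line in line_set:
--         temp = line.lstrip()
--         if temp[:4].lower() == 'host':
--             hostAddress = line[line.find(':') + 1:].lstrip().rstrip() #HOST:[<address>:<port>] || HOST:[<address>]
--
--             indexOne = hostAddress.find(':')
--             if indexOne != -1:
--                 return hostAddress[:indexOne], int(hostAddress[indexOne + 1:].lstrip().rstrip()) #HOST:<address>:[<port>]
--             else: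
--                 break
--
--     # GET <http/s>:<address>:<port>
--     # GET <http/s>:<address>
--     # GET <address>:<port>
--     # GET <address>
--     tempString = line_set[0]
--     indexTwo = line_set[0].find(':')
--     while indexTwo != -1:
--         tempString = tempString[indexTwo + 1:].lstrip().rstrip()
--         if tempString.isnumeric():
--             return hostAddress, int(tempString)
--         indexTwo = tempString.find(':')
--
--     # http  = 80
--     # https = 403
--     if line_set[0].find('https://') != -1:
--         return hostAddress, 403
--     return hostAddress, 80
-- ===== SOURCE B (Python) =====
-- def fetchHost(line_set):
--     # Phase 1: the loop in A returns/breaks at the FIRST host line, so select it directly.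
--     host_line = next((l for l in line_set if l.lstrip()[:4].lower() == 'host'), None)
--     hostAddress = None
--     if host_line is not None:
--         hostAddress = host_line[host_line.find(':') + 1:].strip()
--         i = hostAddress.find(':')
--         if i != -1:
--             return hostAddress[:i], int(hostAddress[i + 1:].strip())
--     # Phase 2: A's while loop strips the remainder after each ':' in turn, but a remainder
--     # that still contains ':' is never numeric, so it can only return on the suffix after
--     # the LAST colon: one rfind replaces the loop.
--     first = line_set[0]
--     j = first.rfind(':')
--     if j != -1:
--         last = first[j + 1:].strip()
--         if last.isnumeric():
--             return hostAddress, int(last)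
--     return hostAddress, 403 if 'https://' in first else 80
-- ===== Notes on version B (the rewrite author's own statement) =====
-- stated objective: simpler
-- what changed: B replaces A's explicit line-scanning for-loop by a next() first-match selection and replaces A's whole while loop (which repeatedly cuts the request line at its first colon and re-strips the remainder) by a single rfind of the last colon, which is the only cut whose remainder can be numeric.
import Mathlib
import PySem

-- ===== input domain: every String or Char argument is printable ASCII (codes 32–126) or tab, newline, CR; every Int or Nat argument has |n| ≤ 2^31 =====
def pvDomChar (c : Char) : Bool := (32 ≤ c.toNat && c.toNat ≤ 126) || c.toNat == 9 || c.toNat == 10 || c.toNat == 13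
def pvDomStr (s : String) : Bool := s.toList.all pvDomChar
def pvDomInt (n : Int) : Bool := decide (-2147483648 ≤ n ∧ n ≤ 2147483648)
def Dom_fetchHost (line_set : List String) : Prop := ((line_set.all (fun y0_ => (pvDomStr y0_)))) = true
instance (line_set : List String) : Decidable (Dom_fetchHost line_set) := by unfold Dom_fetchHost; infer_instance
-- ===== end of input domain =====

-- B replaces A's line-scanning loop by a direct first-match selection and A's whole
-- repeated cut-at-first-colon while loop by a single rfind (objective: simpler).

-- ===== PORT A =====

-- 'temp[:4].lower() == "host"' with temp = line.lstrip(); the identical test appears in both Pythons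
def hostPred (line : String) : Bool :=
  PySem.Str.lower (PySem.Str.slice (PySem.Str.lstrip line) none (some 4)) == "host"

-- the 'for line in line_set' loop: .inl = early return, .inr = hostAddress after break / normal end
def loopA : List String → (Option String × Int) ⊕ (Option String)
  | [] => .inr none
  | line :: rest =>
    if hostPred line then
      -- 'line[line.find(':') + 1:].lstrip().rstrip()'
      let hostAddress := PySem.Str.strip (PySem.Str.slice line (some (PySem.Str.find line ":" + 1)) none)
      let indexOne := PySem.Str.find hostAddress ":"
      if indexOne ≠ -1 then
        -- 'int(...)': Pre_ excludes the ValueError inputs, so .getD 0 is never the value inside Pre_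
        .inl (some (PySem.Str.slice hostAddress none (some indexOne)),
              (PySem.Int.ofStr? (PySem.Str.strip (PySem.Str.slice hostAddress (some (indexOne + 1)) none))).getD 0)
      else .inr (some hostAddress)
    else loopA rest

-- the 'while indexTwo != -1' loop; fuel is only a totality guard (the string shrinks each turn)
-- '.isnumeric()' is ported as strIsdigit: exact on the ASCII domain Dom_fetchHost
def loopW (host : Option String) : Nat → String → Int → Option (Option String × Int)
  | 0, _, _ => none
  | fuel + 1, tempString, indexTwo =>
    if indexTwo ≠ -1 then
      let t := PySem.Str.strip (PySem.Str.slice tempString (some (indexTwo + 1)) none)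
      if PySem.Str.strIsdigit t then some (host, (PySem.Int.ofStr? t).getD 0)
      else loopW host fuel t (PySem.Str.find t ":")
    else none

def fetchHost (line_set : List String) : Option String × Int :=
  match loopA line_set with
  | .inl r => r
  | .inr hostAddress =>
    -- 'line_set[0]': Pre_ excludes the empty list (IndexError), so .getD "" is never the value inside Pre_
    let first := (PySem.List.pyGet? line_set 0).getD ""
    match loopW hostAddress (first.toList.length + 1) first (PySem.Str.find first ":") with
    | some r => r
    | none =>
      if PySem.Str.find first "https://" ≠ -1 then (hostAddress, 403) else (hostAddress, 80)

-- ===== PORT B =====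

-- B's phase 2: one rfind instead of A's while loop; fb = the shared fall-through return
def altTail (hostAddress : Option String) (first : String) : Option String × Int :=
  let fb := if PySem.Str.isIn "https://" first then (hostAddress, (403 : Int)) else (hostAddress, (80 : Int))
  let j := PySem.Str.rfind first ":"
  if j ≠ -1 then
    let last := PySem.Str.strip (PySem.Str.slice first (some (j + 1)) none)
    -- '.isnumeric()' ported as strIsdigit: exact on the ASCII domain Dom_fetchHost
    if PySem.Str.strIsdigit last then (hostAddress, (PySem.Int.ofStr? last).getD 0)
    else fb
  else fb

def fetchHost_alt (line_set : List String) : Option String × Int :=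
  -- 'next((l for l in line_set if …), None)'
  match line_set.find? hostPred with
  | some host_line =>
    let hostAddress := PySem.Str.strip (PySem.Str.slice host_line (some (PySem.Str.find host_line ":" + 1)) none)
    let i := PySem.Str.find hostAddress ":"
    if i ≠ -1 then
      (some (PySem.Str.slice hostAddress none (some i)),
       (PySem.Int.ofStr? (PySem.Str.strip (PySem.Str.slice hostAddress (some (i + 1)) none))).getD 0)
    else altTail (some hostAddress) ((PySem.List.pyGet? line_set 0).getD "")
  | none => altTail none ((PySem.List.pyGet? line_set 0).getD "")

-- ===== PRECONDITION & SPEC =====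

-- Pre_ excludes exactly the inputs on which the Python A raises: the empty list (IndexError at
-- line_set[0]) and a first host line whose part after its second colon int() cannot parse
-- (ValueError). A returns normally on every other input of the domain.
def hostPortOk (l : String) : Bool :=
  let hostAddress := PySem.Str.strip (PySem.Str.slice l (some (PySem.Str.find l ":" + 1)) none)
  let i := PySem.Str.find hostAddress ":"
  (i == -1) || (PySem.Int.ofStr? (PySem.Str.strip (PySem.Str.slice hostAddress (some (i + 1)) none))).isSome

def Pre_fetchHost (line_set : List String) : Prop :=
  line_set ≠ [] ∧ (line_set.find? hostPred).all hostPortOk = true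
instance (line_set : List String) : Decidable (Pre_fetchHost line_set) := by
  unfold Pre_fetchHost; infer_instance

def pvWitness_fetchHost : List String := ["GET http://x.y/ HTTP/1.1", "Host: x.y:8080"]

def Spec_fetchHost (line_set : List String) (out : Option String × Int) : Prop := out = fetchHost_alt line_set
instance (line_set : List String) (out : Option String × Int) : Decidable (Spec_fetchHost line_set out) := by unfold Spec_fetchHost; infer_instance

-- ===== CLAIM (what is proved, stated in full; the proofs are below) =====
def Claim_equal_fetchHost : Prop := ∀ (line_set : List String), Dom_fetchHost line_set → Pre_fetchHost line_set → Spec_fetchHost line_set (fetchHost line_set)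

-- ===== LEMMAS AND PROOFS =====

-- phase 1: A's loop is first-match selection
theorem loopA_eq (ls : List String) :
    loopA ls =
      match ls.find? hostPred with
      | some line =>
        let hostAddress := PySem.Str.strip (PySem.Str.slice line (some (PySem.Str.find line ":" + 1)) none)
        let indexOne := PySem.Str.find hostAddress ":"
        if indexOne ≠ -1 then
          .inl (some (PySem.Str.slice hostAddress none (some indexOne)),
                (PySem.Int.ofStr? (PySem.Str.strip (PySem.Str.slice hostAddress (some (indexOne + 1)) none))).getD 0)
        else .inr (some hostAddress)
      | none => .inr none := by
  induction ls with
  | nil => rfl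
  | cons l rest ih =>
    by_cases h : hostPred l = true
    · rw [List.find?_cons_of_pos h]
      simp only [loopA, h, if_true]
    · rw [List.find?_cons_of_neg (by simp [h])]
      rw [← ih]
      simp only [loopA, h, Bool.false_eq_true, if_false]

-- [c] is a prefix iff the first element is c
theorem singleton_prefix_iff (c : Char) (l : List Char) : [c] <+: l ↔ l[0]? = some c := by
  cases l with
  | nil => simp
  | cons a t => simp [List.cons_prefix_cons, eq_comm]

-- [c] is an infix iff c is a member
theorem singleton_infix_iff (c : Char) (l : List Char) : [c] <:+: l ↔ c ∈ l := by
  constructor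
  · intro h; exact (List.singleton_sublist).mp h.sublist
  · intro h
    obtain ⟨s, t, rfl⟩ := List.append_of_mem h
    exact ⟨s, t, by simp⟩

theorem find_char_neg (c : Char) (l : List Char) (h : PySem.Chars.find l [c] = -1) : c ∉ l := by
  intro hc
  exact ((PySem.Chars.find_eq_neg_one_iff l [c]).mp h) ((singleton_infix_iff c l).mpr hc)

-- find on a single char, positive case
theorem find_char_spec (c : Char) (l : List Char) (h : PySem.Chars.find l [c] ≠ -1) :
    ∃ i : Nat, PySem.Chars.find l [c] = (i : Int) ∧ l[i]? = some c ∧ ∀ k < i, l[k]? ≠ some c := by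
  have h0 : 0 ≤ PySem.Chars.find l [c] := by
    have := PySem.Chars.neg_one_le_find l [c]; omega
  obtain ⟨hpre, hmin⟩ := PySem.Chars.find_spec (s := l) (sub := [c]) h0
  refine ⟨(PySem.Chars.find l [c]).toNat, by omega, ?_, ?_⟩
  · have := (singleton_prefix_iff c _).mp hpre
    simpa [List.getElem?_drop] using this
  · intro k hk hc
    exact hmin k hk ((singleton_prefix_iff c _).mpr (by simpa [List.getElem?_drop] using hc))

-- rfind.go on a single char: negative case
theorem rfind_go_neg (c : Char) (s : List Char) (k : Nat)
    (h : ∀ j ≤ k, s[j]? ≠ some c) : PySem.Chars.rfind.go s [c] k = -1 := by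
  induction k with
  | zero =>
    rw [PySem.Chars.rfind.go.eq_1]
    rw [if_neg]
    intro hpre
    exact h 0 (le_refl 0) ((singleton_prefix_iff c s).mp ((List.isPrefixOf_iff_prefix).mp hpre))
  | succ k ih =>
    rw [PySem.Chars.rfind.go.eq_2]
    rw [if_neg]
    · exact ih (fun j hj => h j (by omega))
    · intro hpre
      have := (singleton_prefix_iff c _).mp ((List.isPrefixOf_iff_prefix).mp hpre)
      exact h (k + 1) (le_refl _) (by simpa [List.getElem?_drop] using this)

-- rfind.go on a single char: positive case (j = the greatest hit ≤ k)
theorem rfind_go_pos (c : Char) (s : List Char) (k j : Nat)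
    (hj : j ≤ k) (hc : s[j]? = some c) (hmax : ∀ i, j < i → i ≤ k → s[i]? ≠ some c) :
    PySem.Chars.rfind.go s [c] k = (j : Int) := by
  induction k with
  | zero =>
    interval_cases j
    rw [PySem.Chars.rfind.go.eq_1,
      if_pos ((List.isPrefixOf_iff_prefix).mpr ((singleton_prefix_iff c s).mpr hc))]
    norm_num
  | succ k ih =>
    rw [PySem.Chars.rfind.go.eq_2]
    by_cases hk : s[k + 1]? = some c
    · have : j = k + 1 := by
        by_contra hne
        exact hmax (k + 1) (by omega) (le_refl _) hk
      subst this
      rw [if_pos]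
      exact (List.isPrefixOf_iff_prefix).mpr ((singleton_prefix_iff c _).mpr
        (by simpa [List.getElem?_drop] using hk))
    · have hjk : j ≤ k := by
        rcases Nat.lt_or_ge j (k + 1) with h' | h'
        · omega
        · exfalso; have : j = k + 1 := by omega
          subst this; exact hk hc
      rw [if_neg]
      · exact ih hjk (fun i h1 h2 => hmax i h1 (by omega))
      · intro hpre
        exact hk (by simpa [List.getElem?_drop] using
          (singleton_prefix_iff c _).mp ((List.isPrefixOf_iff_prefix).mp hpre))

theorem rfind_char_spec (c : Char) (l : List Char) (h : c ∈ l) :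
    ∃ j : Nat, PySem.Chars.rfind l [c] = (j : Int) ∧ l[j]? = some c ∧ ∀ i, j < i → l[i]? ≠ some c := by
  obtain ⟨m, hm⟩ := (List.mem_iff_getElem?).mp h
  have hml : m < l.length := by
    by_contra hge
    rw [List.getElem?_eq_none (by omega)] at hm; cases hm
  set j := Nat.findGreatest (fun k => l[k]? = some c) l.length with hjdef
  have hjc : l[j]? = some c :=
    Nat.findGreatest_spec (P := fun k => l[k]? = some c) (by omega) hm
  have hjmax : ∀ i, j < i → l[i]? ≠ some c := by
    intro i hi
    by_cases hil : i ≤ l.length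
    · exact Nat.findGreatest_is_greatest hi hil
    · rw [List.getElem?_eq_none (by omega)]; simp
  refine ⟨j, ?_, hjc, hjmax⟩
  exact rfind_go_pos c l l.length j (Nat.findGreatest_le _) hjc
    (fun i h1 _ => hjmax i h1)

theorem rfind_char_neg_iff (c : Char) (l : List Char) :
    PySem.Chars.rfind l [c] = -1 ↔ c ∉ l := by
  constructor
  · intro h hc
    obtain ⟨j, hj, -, -⟩ := rfind_char_spec c l hc
    rw [hj] at h; omega
  · intro h
    exact rfind_go_neg c l l.length (fun j _ hj => h (List.mem_of_getElem? hj))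

-- membership of a char the predicate rejects passes through dropWhile
theorem mem_dropWhile_iff {α : Type} (p : α → Bool) (a : α) (h : p a = false) (l : List α) :
    a ∈ l.dropWhile p ↔ a ∈ l := by
  induction l with
  | nil => simp
  | cons x xs ih =>
    rw [List.dropWhile_cons]
    by_cases hx : p x = true
    · rw [if_pos hx, ih, List.mem_cons]
      constructor
      · exact Or.inr
      · rintro (rfl | hm)
        · rw [hx] at h; cases h
        · exact hm
    · rw [if_neg hx]

theorem mem_strip_iff (c : Char) (h : PySem.Chars.isspace c = false) (l : List Char) :
    c ∈ PySem.Chars.strip l ↔ c ∈ l := by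
  simp [PySem.Chars.strip, PySem.Chars.rstrip, PySem.Chars.lstrip,
        mem_dropWhile_iff _ _ h, List.mem_reverse]

-- strip decomposition: l = whitespace ++ strip l ++ whitespace
theorem strip_decomp (l : List Char) :
    ∃ u w, l = u ++ PySem.Chars.strip l ++ w ∧
      (∀ x ∈ u, PySem.Chars.isspace x = true) ∧ (∀ x ∈ w, PySem.Chars.isspace x = true) := by
  refine ⟨List.takeWhile PySem.Chars.isspace l,
    (List.takeWhile PySem.Chars.isspace (List.dropWhile PySem.Chars.isspace l).reverse).reverse,
    ?_, fun x hx => List.mem_takeWhile_imp hx,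
    fun x hx => List.mem_takeWhile_imp (List.mem_reverse.mp hx)⟩
  unfold PySem.Chars.strip PySem.Chars.rstrip PySem.Chars.lstrip
  conv_lhs => rw [← List.takeWhile_append_dropWhile (p := PySem.Chars.isspace) (l := l)]
  rw [List.append_assoc]
  congr 1
  conv_lhs => rw [← List.reverse_reverse (List.dropWhile PySem.Chars.isspace l),
    ← List.takeWhile_append_dropWhile (p := PySem.Chars.isspace)
      (l := (List.dropWhile PySem.Chars.isspace l).reverse)]
  rw [List.reverse_append]

theorem strip_append_ws (x w : List Char) (hw : ∀ a ∈ w, PySem.Chars.isspace a = true) :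
    PySem.Chars.strip (x ++ w) = PySem.Chars.strip x := by
  have hwnil : List.dropWhile PySem.Chars.isspace w.reverse = [] :=
    List.dropWhile_eq_nil_iff.mpr (fun a ha => hw a (List.mem_reverse.mp ha))
  unfold PySem.Chars.strip PySem.Chars.lstrip PySem.Chars.rstrip
  rw [List.dropWhile_append]
  by_cases hx : (List.dropWhile PySem.Chars.isspace x).isEmpty = true
  · rw [if_pos hx]
    rw [List.isEmpty_iff.mp hx]
    rw [List.dropWhile_eq_nil_iff.mpr (fun a ha => hw a ha)]
  · rw [if_neg hx]
    rw [List.reverse_append, List.dropWhile_append, if_pos (by rw [hwnil]; rfl)]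

theorem strip_length_le (l : List Char) : (PySem.Chars.strip l).length ≤ l.length := by
  obtain ⟨u, w, hd, -, -⟩ := strip_decomp l
  have := congrArg List.length hd
  simp only [List.length_append] at this
  omega

-- key step 1: if the stripped remainder after the FIRST colon has no colon,
-- the first colon is the last one
theorem afterLast_last (cs : List Char) (i : Nat)
    (hfind : PySem.Chars.find cs [':'] = (i : Int))
    (ht : ':' ∉ PySem.Chars.strip (cs.drop (i + 1))) :
    PySem.Chars.rfind cs [':'] = (i : Int) := by
  have hnotsp : PySem.Chars.isspace ':' = false := by decide
  obtain ⟨i', hi', hci, hmin⟩ := find_char_spec ':' cs (by rw [hfind]; omega)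
  have hii : i' = i := by omega
  rw [hii] at hci hmin
  have hnd : ':' ∉ cs.drop (i + 1) := fun hc => ht ((mem_strip_iff ':' hnotsp _).mpr hc)
  rw [PySem.Chars.rfind]
  exact rfind_go_pos ':' cs cs.length i
    (by obtain ⟨h, -⟩ := List.getElem?_eq_some_iff.mp hci; omega) hci
    (fun k hk _ hkc => hnd (List.mem_of_getElem?
      (by rw [List.getElem?_drop]; rw [show i + 1 + (k - (i + 1)) = k by omega]; exact hkc)))

-- key step 2: if the stripped remainder t after the FIRST colon still has a colon,
-- the suffix after the LAST colon of cs, stripped, equals the one of t, stripped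
theorem afterLast_step (cs : List Char) (i : Nat)
    (hfind : PySem.Chars.find cs [':'] = (i : Int))
    (ht : ':' ∈ PySem.Chars.strip (cs.drop (i + 1))) :
    ∃ j jt : Nat, PySem.Chars.rfind cs [':'] = (j : Int) ∧
      PySem.Chars.rfind (PySem.Chars.strip (cs.drop (i + 1))) [':'] = (jt : Int) ∧
      PySem.Chars.strip (cs.drop (j + 1)) =
        PySem.Chars.strip ((PySem.Chars.strip (cs.drop (i + 1))).drop (jt + 1)) := by
  have hnotsp : PySem.Chars.isspace ':' = false := by decide
  set d := cs.drop (i + 1) with hddef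
  set t := PySem.Chars.strip d with htdef
  have hd : ':' ∈ d := (mem_strip_iff ':' hnotsp d).mp ht
  -- last colon of cs
  have hcs : ':' ∈ cs := by
    obtain ⟨m, hm⟩ := List.mem_iff_getElem?.mp hd
    exact List.mem_of_getElem? (l := cs) (i := i + 1 + m) (by rwa [← List.getElem?_drop])
  obtain ⟨j, hj, hjc, hjmax⟩ := rfind_char_spec ':' cs hcs
  obtain ⟨jt, hjt, hjtc, hjtmax⟩ := rfind_char_spec ':' t ht
  -- decompose t inside d
  obtain ⟨u, w, hdecomp, hu, hw⟩ := strip_decomp d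
  rw [← htdef] at hdecomp
  -- j ≥ i+1 and j - (i+1) is the last colon of d
  have hfirst := find_char_spec ':' cs (by rw [hfind]; omega)
  obtain ⟨i', hi', hic, -⟩ := hfirst
  have hii : i' = i := by omega
  rw [hii] at hic
  -- the colon in d sits beyond i, so j > i
  have hji : i + 1 ≤ j := by
    obtain ⟨m, hm⟩ := List.mem_iff_getElem?.mp hd
    rw [hddef, List.getElem?_drop] at hm
    by_contra hlt
    exact hjmax (i + 1 + m) (by omega) hm
  -- d's index of the last colon
  have hjd : d[j - (i + 1)]? = some ':' := by
    rw [hddef, List.getElem?_drop, show i + 1 + (j - (i + 1)) = j by omega]; exact hjc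
  have hjdmax : ∀ m, j - (i + 1) < m → d[m]? ≠ some ':' := by
    intro m hm hmc
    rw [hddef, List.getElem?_drop] at hmc
    exact hjmax (i + 1 + m) (by omega) hmc
  -- within d = u ++ t ++ w, the last colon is at u.length + jt
  have hjlen : jt < t.length := by
    obtain ⟨h, -⟩ := List.getElem?_eq_some_iff.mp hjtc; omega
  have hdu : d[u.length + jt]? = some ':' := by
    rw [hdecomp, List.append_assoc, List.getElem?_append_right (by omega),
      show u.length + jt - u.length = jt by omega,
      List.getElem?_append_left (by omega)]
    exact hjtc
  have hdumax : ∀ m, u.length + jt < m → d[m]? ≠ some ':' := by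
    intro m hm hmc
    rw [hdecomp, List.append_assoc] at hmc
    by_cases h1 : m < u.length
    · omega
    · rw [List.getElem?_append_right (by omega)] at hmc
      by_cases h2 : m - u.length < t.length
      · rw [List.getElem?_append_left h2] at hmc
        exact hjtmax (m - u.length) (by omega) hmc
      · rw [List.getElem?_append_right (by omega)] at hmc
        have : ':' ∈ w := List.mem_of_getElem? hmc
        have := hw ':' this
        rw [hnotsp] at this; cases this
  -- hence j - (i+1) = u.length + jt
  have heq : j - (i + 1) = u.length + jt := by
    by_cases hlt : j - (i + 1) < u.length + jt
    · exact absurd hdu (hjdmax _ hlt)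
    · by_cases hgt : u.length + jt < j - (i + 1)
      · exact absurd hjd (hdumax _ hgt)
      · omega
  refine ⟨j, jt, hj, hjt, ?_⟩
  -- drop (j+1) cs = drop (j - (i+1) + 1) d = drop (jt+1) t ++ w
  have hdrop1 : cs.drop (j + 1) = d.drop (j - (i + 1) + 1) := by
    rw [hddef, List.drop_drop]
    congr 1
    omega
  rw [hdrop1, heq, hdecomp, List.append_assoc,
    show u.length + jt + 1 = u.length + (jt + 1) by omega,
    List.drop_length_add_append,
    List.drop_append_of_le_length (by omega)]
  exact strip_append_ws _ w hw

-- ===== phase-2 master lemma, list level =====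

-- proof-level clone of loopW over List Char (via the PySem Str→Chars bridges)
def loopWC (host : Option String) : Nat → List Char → Int → Option (Option String × Int)
  | 0, _, _ => none
  | fuel + 1, cs, indexTwo =>
    if indexTwo ≠ -1 then
      let t := PySem.Chars.strip (PySem.Chars.slice cs (some (indexTwo + 1)) none)
      if PySem.Chars.strIsdigit t then some (host, (PySem.Int.ofChars? t).getD 0)
      else loopWC host fuel t (PySem.Chars.find t [':'])
    else none

theorem loopW_toList (host : Option String) (fuel : Nat) :
    ∀ (s : String) (i : Int), loopW host fuel s i = loopWC host fuel s.toList i := by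
  induction fuel with
  | zero => intro s i; rfl
  | succ fuel ih =>
    intro s i
    simp only [loopW, loopWC]
    by_cases hi : i ≠ -1
    · rw [if_pos hi, if_pos hi]
      have hbr : (PySem.Str.strip (PySem.Str.slice s (some (i + 1)) none)).toList
          = PySem.Chars.strip (PySem.Chars.slice s.toList (some (i + 1)) none) := by
        simp
      have hfind : PySem.Str.find (PySem.Str.strip (PySem.Str.slice s (some (i + 1)) none)) ":"
          = PySem.Chars.find (PySem.Chars.strip (PySem.Chars.slice s.toList (some (i + 1)) none)) [':'] := by
        show PySem.Chars.find _ (":".toList) = _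
        rw [hbr, show (":" : String).toList = [':'] from rfl]
      simp only [PySem.Str.strIsdigit, PySem.Int.ofStr?, hbr, hfind, ih]
    · rw [if_neg hi, if_neg hi]

-- the RHS of the master lemma: B's single-rfind computation, list level
def tailC (host : Option String) (cs : List Char) : Option (Option String × Int) :=
  if PySem.Chars.rfind cs [':'] ≠ -1 then
    let last := PySem.Chars.strip (PySem.Chars.slice cs (some (PySem.Chars.rfind cs [':'] + 1)) none)
    if PySem.Chars.strIsdigit last then some (host, (PySem.Int.ofChars? last).getD 0) else none
  else none

theorem digit_no_colon (l : List Char) (h : PySem.Chars.strIsdigit l = true) : ':' ∉ l := by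
  intro hc
  have := (List.all_eq_true.mp (Bool.and_elim_right h)) _ hc
  simp [PySem.Chars.isdigit] at this

theorem slice_from_nat (cs : List Char) (i : Nat) :
    PySem.Chars.slice cs (some ((i : Int) + 1)) none = cs.drop (i + 1) := by
  rw [show ((i : Int) + 1) = ((i + 1 : Nat) : Int) by push_cast; ring]
  rw [PySem.Chars.slice_eq_listSlice, PySem.List.slice_from cs (by omega)]
  simp

theorem loopWC_eq (host : Option String) (fuel : Nat) :
    ∀ (cs : List Char), cs.length < fuel →
      loopWC host fuel cs (PySem.Chars.find cs [':']) = tailC host cs := by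
  induction fuel with
  | zero => intro cs h; omega
  | succ fuel ih =>
    intro cs hlen
    by_cases hfind : PySem.Chars.find cs [':'] ≠ -1
    · obtain ⟨i, hi, hic, _⟩ := find_char_spec ':' cs hfind
      have hil : i < cs.length := by obtain ⟨h, -⟩ := List.getElem?_eq_some_iff.mp hic; omega
      simp only [loopWC, if_pos hfind]
      rw [hi, slice_from_nat]
      set t := PySem.Chars.strip (cs.drop (i + 1)) with htdef
      have htlen : t.length < fuel := by
        have h1 : t.length ≤ (cs.drop (i + 1)).length := by
          rw [htdef]; exact strip_length_le _
        have h2 : (cs.drop (i + 1)).length = cs.length - (i + 1) := by simp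
        omega
      by_cases hdig : PySem.Chars.strIsdigit t = true
      · rw [if_pos hdig]
        -- t has no colon, so the first colon is the last one
        have hrf := afterLast_last cs i hi (digit_no_colon t hdig)
        unfold tailC
        rw [if_pos (c := PySem.Chars.rfind cs [':'] ≠ -1) (by rw [hrf]; omega),
          hrf, slice_from_nat, ← htdef, if_pos hdig]
      · rw [if_neg hdig]
        by_cases hmem : ':' ∈ t
        · -- recurse; B's value is stable under one cut
          obtain ⟨j, jt, hj, hjt, hstab⟩ := afterLast_step cs i hi hmem
          rw [← htdef] at hjt hstab
          rw [ih t htlen]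
          unfold tailC
          rw [if_pos (c := PySem.Chars.rfind t [':'] ≠ -1) (by rw [hjt]; omega),
            if_pos (c := PySem.Chars.rfind cs [':'] ≠ -1) (by rw [hj]; omega)]
          rw [hj, hjt, slice_from_nat, slice_from_nat, hstab]
        · -- no colon left: both sides fall through
          have hfn : PySem.Chars.find t [':'] = -1 :=
            (PySem.Chars.find_eq_neg_one_iff t [':']).mpr
              (fun hinf => hmem ((singleton_infix_iff ':' t).mp hinf))
          have hrf := afterLast_last cs i hi hmem
          cases fuel with
          | zero => omega
          | succ fuel' =>
            simp only [loopWC, hfn]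
            norm_num
            unfold tailC
            rw [if_pos (c := PySem.Chars.rfind cs [':'] ≠ -1) (by rw [hrf]; omega),
              hrf, slice_from_nat, ← htdef, if_neg hdig]
    · simp only [ne_eq, not_not] at hfind
      have hrf : PySem.Chars.rfind cs [':'] = -1 :=
        (rfind_char_neg_iff ':' cs).mpr (find_char_neg ':' cs hfind)
      simp only [loopWC, hfind, tailC, hrf]
      simp

-- lifting tailC back to B's altTail
theorem altTail_eq (host : Option String) (first : String) :
    altTail host first =
      match tailC host first.toList with
      | some r => r
      | none =>
        if PySem.Str.isIn "https://" first then (host, (403 : Int)) else (host, (80 : Int)) := by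
  have hrw : PySem.Str.rfind first ":" = PySem.Chars.rfind first.toList [':'] := rfl
  simp only [altTail, tailC, hrw]
  by_cases hj : PySem.Chars.rfind first.toList [':'] ≠ -1
  · rw [if_pos hj, if_pos hj]
    have hb : (PySem.Str.strip (PySem.Str.slice first (some (PySem.Chars.rfind first.toList [':'] + 1)) none)).toList
        = PySem.Chars.strip (PySem.Chars.slice first.toList (some (PySem.Chars.rfind first.toList [':'] + 1)) none) := by
      simp
    have hdigeq : PySem.Str.strIsdigit (PySem.Str.strip (PySem.Str.slice first (some (PySem.Chars.rfind first.toList [':'] + 1)) none))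
        = PySem.Chars.strIsdigit (PySem.Chars.strip (PySem.Chars.slice first.toList (some (PySem.Chars.rfind first.toList [':'] + 1)) none)) := by
      show PySem.Chars.strIsdigit _ = _
      rw [hb]
    have hinteq : PySem.Int.ofStr? (PySem.Str.strip (PySem.Str.slice first (some (PySem.Chars.rfind first.toList [':'] + 1)) none))
        = PySem.Int.ofChars? (PySem.Chars.strip (PySem.Chars.slice first.toList (some (PySem.Chars.rfind first.toList [':'] + 1)) none)) := by
      show PySem.Int.ofChars? _ = _
      rw [hb]
    rw [hdigeq, hinteq]
    cases hd : PySem.Chars.strIsdigit (PySem.Chars.strip (PySem.Chars.slice first.toList (some (PySem.Chars.rfind first.toList [':'] + 1)) none)) with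
    | true => rw [if_pos rfl]; rfl
    | false => rw [if_neg (by simp)]; rfl
  · rw [if_neg hj, if_neg hj]

-- the two fall-through returns agree ('find != -1' vs 'in')
theorem fallback_eq (first : String) (x y : Option String × Int) :
    (if PySem.Str.find first "https://" ≠ -1 then x else y)
      = (if PySem.Str.isIn "https://" first then x else y) := by
  by_cases h : "https://".toList <:+: first.toList
  · rw [if_pos (by rw [Ne, PySem.Str.find_eq_neg_one_iff]; simpa using h),
        if_pos ((PySem.Str.isIn_iff_infix _ _).mpr h)]
  · rw [if_neg (by rw [Ne, PySem.Str.find_eq_neg_one_iff]; simpa using h), if_neg (by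
      intro hc; exact h ((PySem.Str.isIn_iff_infix _ _).mp hc))]

-- A's whole phase 2 equals B's altTail
theorem tail_eq (host : Option String) (first : String) :
    (match loopW host (first.toList.length + 1) first (PySem.Str.find first ":") with
     | some r => r
     | none =>
       if PySem.Str.find first "https://" ≠ -1 then (host, (403 : Int)) else (host, (80 : Int)))
      = altTail host first := by
  rw [loopW_toList, altTail_eq,
    show PySem.Str.find first ":" = PySem.Chars.find first.toList [':'] from rfl,
    loopWC_eq host _ first.toList (Nat.lt_succ_self _)]
  cases tailC host first.toList with
  | some r => rfl
  | none => exact fallback_eq first _ _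

theorem fetchHost_eq_alt (line_set : List String) : fetchHost line_set = fetchHost_alt line_set := by
  unfold fetchHost fetchHost_alt
  rw [loopA_eq]
  cases hf : line_set.find? hostPred with
  | none => exact tail_eq none ((PySem.List.pyGet? line_set 0).getD "")
  | some line =>
    simp only
    by_cases hi : PySem.Str.find (PySem.Str.strip (PySem.Str.slice line (some (PySem.Str.find line ":" + 1)) none)) ":" ≠ -1
    · rw [if_pos hi, if_pos hi]
    · rw [if_neg hi, if_neg hi]
      exact tail_eq _ ((PySem.List.pyGet? line_set 0).getD "")

-- ===== VERDICT (by name: the statement is the Claim_ definition above) =====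
theorem fetchHost_spec : Claim_equal_fetchHost := by
  intro line_set _ _
  unfold Spec_fetchHost
  exact fetchHost_eq_alt line_set
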